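-- pv_equiv track=rewrite | github.com/zazabap/problem-reductions | docs/paper/verify-reductions/verify_minimum_dominating_set_min_max_multicenter.py | check_extraction
-- ===== SOURCE A (Python) =====
-- from collections import deque
-- from itertools import combinations, product
-- from typing import Optional
--
-- def extract_solution(config: list[int]) -> list[int]:
--     """
--     Extract a DominatingSet solution from a MinMaxMulticenter solution.
--
--     Since the graph is preserved identically and the configuration space
--     is the same (binary indicator per vertex), the configuration maps
--     directly: the set of centers IS the dominating set.
--     """
--     return list(config)
--
-- def is_dominating_set(adj: list[set[int]], config: list[int]) -> bool:
--     """Check whether config (binary indicator) selects a dominating set."""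
--     n = len(adj)
--     for v in range(n):
--         if config[v] == 1:
--             continue
--         # v must have a neighbor in the selected set
--         if not any(config[u] == 1 for u in adj[v]):
--             return False
--     return True
--
-- def shortest_distances_from_centers(
--     adj: list[set[int]], config: list[int]
-- ) -> Optional[list[int]]:
--     """
--     BFS multi-source shortest distances from all centers (config[v]=1).
--     Returns list of distances, or None if any vertex is unreachable.
--     """
--     n = len(adj)
--     dist = [-1] * n
--     queue = deque()
--     for v in range(n):
--         if config[v] == 1:
--             dist[v] = 0
--             queue.append(v)
--     while queue:
--         u = queue.popleft()
--         for w in adj[u]: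
--             if dist[w] == -1:
--                 dist[w] = dist[u] + 1
--                 queue.append(w)
--     if any(d == -1 for d in dist):
--         return None
--     return dist
--
-- def is_feasible_multicenter(
--     adj: list[set[int]], config: list[int], k: int, B: int = 1
-- ) -> bool:
--     """Check whether config is a feasible MinMaxMulticenter solution."""
--     n = len(adj)
--     num_selected = sum(config)
--     if num_selected != k:
--         return False
--     distances = shortest_distances_from_centers(adj, config)
--     if distances is None:
--         return False
--     # vertex_weights = 1 for all, so max weighted distance = max distance
--     return max(distances) <= B
--
-- def check_extraction(adj: list[set[int]], edges: list[tuple[int, int]], k: int) -> int: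
--     """Section 3: Extraction — extract source solution from every feasible target witness.
--     Returns the number of extraction checks performed."""
--     n = len(adj)
--     checks = 0
--     for chosen in combinations(range(n), k):
--         config = [0] * n
--         for v in chosen:
--             config[v] = 1
--         if is_feasible_multicenter(adj, config, k, 1):
--             extracted = extract_solution(config)
--             assert is_dominating_set(adj, extracted), (
--                 f"Extraction failed: n={n}, edges={edges}, k={k}, config={config}"
--             )
--             checks += 1
--     return checks
-- ===== SOURCE B (Python) =====
-- from itertools import combinations
--
--
-- def check_extraction(adj: list[set[int]], edges: list[tuple[int, int]], k: int) -> int: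
--     """Count k-subsets that are feasible multicenter solutions (radius 1).
--
--     A k-subset is feasible iff it dominates the graph, so we check one-step
--     domination directly instead of running a multi-source BFS per subset.
--     """
--     n = len(adj)
--     count = 0
--     for chosen in combinations(range(n), k):
--         sel = set(chosen)
--         if all(v in sel or any(u in sel for u in adj[v]) for v in range(n)):
--             count += 1
--     return count
-- ===== Notes on version B (the rewrite author's own statement) =====
-- stated objective: simpler
-- what changed: The per-subset multi-source BFS (deque, distance array, max over distances) is replaced by a direct one-step domination test: a k-subset is counted iff every vertex is selected or has a selected neighbour, which on the symmetric graphs of the domain is exactly A's feasibility-plus-assert path.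
-- outside the precondition, e.g. on check_extraction([set(), {0}, {0}], [], 1): A returns 0, B returns 1; on check_extraction([{-1}], [], 1): A returns 1, B returns 1
import Mathlib
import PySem

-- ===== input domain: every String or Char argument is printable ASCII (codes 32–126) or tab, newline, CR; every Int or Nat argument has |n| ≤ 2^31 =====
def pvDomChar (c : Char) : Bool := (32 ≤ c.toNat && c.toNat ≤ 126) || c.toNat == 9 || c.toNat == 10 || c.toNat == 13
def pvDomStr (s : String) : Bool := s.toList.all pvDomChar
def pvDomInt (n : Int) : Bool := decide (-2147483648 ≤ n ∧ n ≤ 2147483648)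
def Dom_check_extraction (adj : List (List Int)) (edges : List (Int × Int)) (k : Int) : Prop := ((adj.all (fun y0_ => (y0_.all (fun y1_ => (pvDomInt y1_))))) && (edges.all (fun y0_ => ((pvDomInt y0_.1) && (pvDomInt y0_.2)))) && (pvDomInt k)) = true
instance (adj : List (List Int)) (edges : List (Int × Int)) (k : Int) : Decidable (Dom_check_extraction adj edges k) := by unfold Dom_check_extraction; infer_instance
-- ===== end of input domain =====

-- B replaces A's per-subset multi-source BFS feasibility check by a direct one-step
-- domination scan (objective: simpler); equal on symmetric in-range adjacency (Pre_).

-- ===== PORT A =====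

-- itertools.combinations(xs, r): r-element subsequences in lexicographic order
-- (shared helper: both A and B call itertools.combinations)
def pvComb : List Int → Nat → List (List Int)
  | _, 0 => [[]]
  | [], _ + 1 => []
  | x :: rest, r + 1 => (pvComb rest r).map (fun c => x :: c) ++ pvComb rest (r + 1)

-- is_dominating_set: early-return-False loop ≡ all (the loop body is pure)
def pv_is_dominating_set (adj : List (List Int)) (config : List Int) : Bool :=
  (PySem.List.pyRange 0 (adj.length : Int) 1).all (fun v =>
    if PySem.List.pyGetD config v 0 = 1 then true
    else (PySem.List.pyGetD adj v []).any (fun u => PySem.List.pyGetD config u 0 = 1))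

-- one BFS relaxation of row adj[u]: for w in adj[u]: if dist[w]==-1: dist[w]=dist[u]+1; queue.append(w)
-- (the queue stores the index as a Nat; Pre_ guarantees every w is in range, where Python would
-- wrap a negative w or raise IndexError the guard below merely totalises)
def pvBfsRow (u : Nat) (row : List Int) (st : List Int × List Nat) : List Int × List Nat :=
  row.foldl (fun st w =>
    if 0 ≤ w ∧ w < (st.1.length : Int) then
      if st.1.getD w.toNat 0 = -1 then
        (st.1.set w.toNat (st.1.getD u 0 + 1), st.2 ++ [w.toNat])
      else st
    else st) st

-- while queue: u = queue.popleft(); relax adj[u].  Fuel n suffices: every pop either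
-- empties the queue or is matched by a -1-cell disappearing (see pvMu lemmas below).
def pvBfsRun (adj : List (List Int)) : Nat → List Int × List Nat → List Int
  | 0, st => st.1
  | _ + 1, (dist, []) => dist
  | f + 1, (dist, u :: q) => pvBfsRun adj f (pvBfsRow u (adj.getD u []) (dist, q))

def pv_shortest_distances (adj : List (List Int)) (config : List Int) : Option (List Int) :=
  let n := adj.length
  -- dist = [-1]*n; for v in range(n): if config[v]==1: dist[v]=0; queue.append(v)
  let init := (List.range n).foldl
    (fun (st : List Int × List Nat) (v : Nat) =>
      if PySem.List.pyGetD config (v : Int) 0 = 1 then (st.1.set v 0, st.2 ++ [v]) else st)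
    (List.replicate n (-1), [])
  let dist := pvBfsRun adj n init
  if dist.any (fun d => d = -1) then none else some dist

def pv_is_feasible_multicenter (adj : List (List Int)) (config : List Int) (k B : Int) : Bool :=
  if config.sum ≠ k then false
  else
    match pv_shortest_distances adj config with
    | none => false
    | some distances =>
      match distances with
      | [] => false       -- Python: max([]) raises ValueError; Pre_ excludes (adj = [] with k = 0)
      | d :: ds => ds.foldl max d ≤ B

def check_extraction (adj : List (List Int)) (edges : List (Int × Int)) (k : Int) : Int :=
  let n := adj.length
  -- combinations(range(n), k): k < 0 raises ValueError in Python, excluded by Pre_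
  (pvComb (PySem.List.pyRange 0 (n : Int) 1) k.toNat).foldl
    (fun checks chosen =>
      -- config = [0]*n; for v in chosen: config[v] = 1
      let config := chosen.foldl (fun cfg v => PySem.List.pySetD cfg v 1) (List.replicate n 0)
      if pv_is_feasible_multicenter adj config k 1 then
        -- extracted = extract_solution(config) = list(config);
        -- assert is_dominating_set(...): raises AssertionError when false (Pre_ excludes that)
        if pv_is_dominating_set adj config then checks + 1 else checks
      else checks)
    0

-- ===== PORT B =====

def check_extraction_alt (adj : List (List Int)) (edges : List (Int × Int)) (k : Int) : Int :=
  let n := adj.length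
  (pvComb (PySem.List.pyRange 0 (n : Int) 1) k.toNat).foldl
    (fun count chosen =>
      let sel := PySem.Set.ofList chosen
      if (PySem.List.pyRange 0 (n : Int) 1).all (fun v =>
            PySem.Set.contains sel v
              || (PySem.List.pyGetD adj v []).any (fun u => PySem.Set.contains sel u))
      then count + 1 else count)
    0

-- ===== PRECONDITION & SPEC =====
-- Pre_ keeps the natural domain: k ≥ 0 (combinations raises ValueError on k < 0), not the empty
-- graph with k = 0 (A raises ValueError via max([])), and — whenever some subset is enumerated,
-- i.e. k ≤ n — adj must be a valid undirected adjacency structure (entries in [0,n), symmetric);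
-- on malformed adjacency A raises IndexError/AssertionError on some inputs and on others returns
-- a value shaped by edge direction or negative-index wraparound.
def Pre_check_extraction (adj : List (List Int)) (edges : List (Int × Int)) (k : Int) : Prop :=
  0 ≤ k ∧ ¬(adj = [] ∧ k = 0) ∧
  (k ≤ (adj.length : Int) →
    (∀ row ∈ adj, ∀ w ∈ row, 0 ≤ w ∧ w < (adj.length : Int)) ∧
    (∀ v : Nat, v < adj.length → ∀ w ∈ adj.getD v [], (v : Int) ∈ adj.getD w.toNat []))

instance (adj : List (List Int)) (edges : List (Int × Int)) (k : Int) :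
    Decidable (Pre_check_extraction adj edges k) := by
  unfold Pre_check_extraction; infer_instance

def pvWitness_check_extraction : List (List Int) × (List (Int × Int)) × Int :=
  ([[1], [0, 2], [1]], [(0, 1), (1, 2)], 1)

def Spec_check_extraction (adj : List (List Int)) (edges : List (Int × Int)) (k : Int) (out : Int) : Prop := out = check_extraction_alt adj edges k
instance (adj : List (List Int)) (edges : List (Int × Int)) (k : Int) (out : Int) : Decidable (Spec_check_extraction adj edges k out) := by unfold Spec_check_extraction; infer_instance

-- ===== CLAIM (what is proved, stated in full; the proofs are below) =====
def Claim_equal_check_extraction : Prop := ∀ (adj : List (List Int)) (edges : List (Int × Int)) (k : Int), Dom_check_extraction adj edges k → Pre_check_extraction adj edges k → Spec_check_extraction adj edges k (check_extraction adj edges k)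

-- ===== LEMMAS AND PROOFS =====

theorem check_extraction_witness_ok :
    Dom_check_extraction pvWitness_check_extraction.1 pvWitness_check_extraction.2.1
      pvWitness_check_extraction.2.2 ∧
    Pre_check_extraction pvWitness_check_extraction.1 pvWitness_check_extraction.2.1
      pvWitness_check_extraction.2.2 := by
  constructor <;> decide


-- ---------- small list helpers ----------

theorem pv_getD_set (l : List Int) (a j : Nat) (v : Int) (ha : a < l.length) :
    (l.set a v).getD j 0 = if j = a then v else l.getD j 0 := by
  simp only [List.getD_eq_getElem?_getD, List.getElem?_set]
  by_cases h : j = a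
  · simp [h, ha]
  · simp [h, Ne.symm h]

theorem pv_sum_set (l : List Int) (a : Nat) (v : Int) (ha : a < l.length) :
    (l.set a v).sum = l.sum - l.getD a 0 + v := by
  induction l generalizing a with
  | nil => simp at ha
  | cons x xs ih =>
    cases a with
    | zero => simp [List.getD]; ring
    | succ a =>
      have ha' : a < xs.length := by simpa using ha
      simp [List.getD_cons_succ, ih a ha']
      ring

theorem pv_countP_set_dec (l : List Int) (a : Nat) (v : Int) (ha : a < l.length)
    (hold : l.getD a 0 = -1) (hv : v ≠ -1) :
    (l.set a v).countP (fun d => d = -1) + 1 = l.countP (fun d => d = -1) := by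
  induction l generalizing a with
  | nil => simp at ha
  | cons x xs ih =>
    cases a with
    | zero =>
      have hx : x = -1 := by simpa [List.getD] using hold
      simp [List.countP_cons, hx, hv]
    | succ a =>
      have ha' : a < xs.length := by simpa using ha
      have hold' : xs.getD a 0 = -1 := by simpa [List.getD_cons_succ] using hold
      have := ih a ha' hold'
      simp only [List.set_cons_succ, List.countP_cons]
      omega

theorem pv_countP_split {α : Type} (l : List α) (p : α → Bool) :
    l.countP p + l.countP (fun a => !(p a)) = l.length := by
  induction l with
  | nil => simp
  | cons x xs ih =>
    by_cases h : p x <;> simp [List.countP_cons, h] <;> omega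

theorem pv_eq_of_getD (l l' : List Int) (hl : l.length = l'.length)
    (h : ∀ j : Nat, j < l.length → l.getD j 0 = l'.getD j 0) : l = l' := by
  apply List.ext_getElem hl
  intro i h1 h2
  have := h i h1
  rwa [List.getD_eq_getElem l 0 h1, List.getD_eq_getElem l' 0 h2] at this

-- ---------- the config array: [0]*n then config[v] = 1 for v in chosen ----------

theorem pv_cfg_getD (ys : List Int) (cfg : List Int) (j : Nat)
    (hb : ∀ y ∈ ys, 0 ≤ y ∧ y < (cfg.length : Int)) :
    (ys.foldl (fun c v => PySem.List.pySetD c v 1) cfg).getD j 0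
      = if (j : Int) ∈ ys then 1 else cfg.getD j 0 := by
  induction ys generalizing cfg with
  | nil => simp
  | cons y ys ih =>
    obtain ⟨hy0, hyl⟩ := hb y (List.mem_cons_self ..)
    rw [List.foldl_cons, PySem.List.pySetD_of_nonneg _ _ hy0,
      ih _ (by intro z hz; have := hb z (List.mem_cons_of_mem _ hz); simpa using this)]
    have hyt : y.toNat < cfg.length := by omega
    rw [pv_getD_set _ _ _ _ hyt]
    have hiff : j = y.toNat ↔ (j : Int) = y := by omega
    by_cases h1 : (j : Int) ∈ ys
    · simp [h1]
    · by_cases h2 : (j : Int) = y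
      · rw [if_neg h1, if_pos (hiff.mpr h2), if_pos (List.mem_cons.mpr (Or.inl h2))]
      · rw [if_neg h1, if_neg (fun hh : j = y.toNat => h2 (hiff.mp hh)),
          if_neg (by rw [List.mem_cons]; rintro (h | h); exacts [h2 h, h1 h])]

theorem pv_cfg_sum (ys : List Int) (cfg : List Int) (hnd : ys.Nodup)
    (hb : ∀ y ∈ ys, 0 ≤ y ∧ y < (cfg.length : Int))
    (h0 : ∀ y ∈ ys, cfg.getD y.toNat 0 = 0) :
    (ys.foldl (fun c v => PySem.List.pySetD c v 1) cfg).sum = cfg.sum + (ys.length : Int) := by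
  induction ys generalizing cfg with
  | nil => simp
  | cons y ys ih =>
    obtain ⟨hy0, hyl⟩ := hb y (List.mem_cons_self ..)
    have hyt : y.toNat < cfg.length := by omega
    rw [List.foldl_cons, PySem.List.pySetD_of_nonneg _ _ hy0]
    rw [ih _ hnd.of_cons]
    · rw [pv_sum_set _ _ _ hyt, h0 y (List.mem_cons_self ..)]
      simp only [List.length_cons]
      push_cast
      ring
    · intro z hz
      have := hb z (List.mem_cons_of_mem _ hz)
      simpa using this
    · intro z hz
      obtain ⟨hz0, hzl⟩ := hb z (List.mem_cons_of_mem _ hz)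
      have hzy : z ≠ y := by
        intro h; rw [h] at hz; exact (List.nodup_cons.mp hnd).1 hz
      rw [pv_getD_set _ _ _ _ hyt, if_neg (by omega)]
      exact h0 z (List.mem_cons_of_mem _ hz)

theorem pvConfig_getD (chosen : List Int) (n : Nat) (j : Nat)
    (hb : ∀ y ∈ chosen, 0 ≤ y ∧ y < (n : Int)) :
    (chosen.foldl (fun cfg v => PySem.List.pySetD cfg v 1) (List.replicate n (0 : Int))).getD j 0
      = if (j : Int) ∈ chosen then 1 else 0 := by
  rw [pv_cfg_getD chosen (List.replicate n (0 : Int)) j (by simpa using hb)]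
  have h0 : (List.replicate n (0 : Int)).getD j 0 = 0 := by
    by_cases h : j < n
    · simp [List.getD_eq_getElem?_getD, List.getElem?_replicate, h]
    · rw [List.getD_eq_default]
      simpa using Nat.le_of_not_lt h
  rw [h0]

theorem pvConfig_sum (chosen : List Int) (n : Nat) (hnd : chosen.Nodup)
    (hb : ∀ y ∈ chosen, 0 ≤ y ∧ y < (n : Int)) :
    (chosen.foldl (fun cfg v => PySem.List.pySetD cfg v 1) (List.replicate n (0 : Int))).sum
      = (chosen.length : Int) := by
  rw [pv_cfg_sum chosen (List.replicate n (0 : Int)) hnd (by simpa using hb)]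
  · simp
  · intro y hy
    obtain ⟨hy0, hyl⟩ := hb y hy
    by_cases h : y.toNat < n
    · simp [List.getD_eq_getElem?_getD, List.getElem?_replicate, h]
    · rw [List.getD_eq_default]
      simpa using Nat.le_of_not_lt h

-- ---------- combinations ----------

theorem pvComb_mem (xs : List Int) (r : Nat) (c : List Int) (hc : c ∈ pvComb xs r) :
    c.Sublist xs ∧ c.length = r := by
  induction xs generalizing r c with
  | nil =>
    cases r with
    | zero => simp [pvComb] at hc; simp [hc]
    | succ r => simp [pvComb] at hc
  | cons x rest ih =>
    cases r with
    | zero => simp [pvComb] at hc; simp [hc]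
    | succ r =>
      simp only [pvComb, List.mem_append, List.mem_map] at hc
      rcases hc with ⟨c', hc', rfl⟩ | hc
      · obtain ⟨hs, hl⟩ := ih r c' hc'
        exact ⟨hs.cons₂ x, by simp [hl]⟩
      · obtain ⟨hs, hl⟩ := ih (r + 1) c hc
        exact ⟨hs.cons x, hl⟩

theorem pvComb_nil (xs : List Int) (r : Nat) (h : xs.length < r) : pvComb xs r = [] := by
  induction xs generalizing r with
  | nil =>
    cases r with
    | zero => simp at h
    | succ r => rfl
  | cons x rest ih =>
    cases r with
    | zero => simp at h
    | succ r =>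
      have h1 : rest.length < r := by simpa using h
      have h2 : rest.length < r + 1 := by omega
      simp [pvComb, ih r h1, ih (r + 1) h2]

-- ---------- the BFS loop ----------

-- coverage at one step from the selected set (along A's edge direction)
def pvCov (adj : List (List Int)) (chosen : List Int) (j : Nat) : Prop :=
  (j : Int) ∈ chosen ∨ ∃ u : Nat, u < adj.length ∧ (u : Int) ∈ chosen ∧ (j : Int) ∈ adj.getD u []

def pvMu (dist : List Int) (q : List Nat) : Nat := q.length + dist.countP (fun d => d = -1)

-- invariant used to read the final distances off (no extra hypotheses)
def pvP1 (adj : List (List Int)) (chosen : List Int) (d : List Int) : Prop :=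
  d.length = adj.length ∧
  (∀ j : Nat, j < adj.length → -1 ≤ d.getD j 0) ∧
  (∀ j : Nat, j < adj.length → d.getD j 0 = 0 → (j : Int) ∈ chosen) ∧
  (∀ j : Nat, j < adj.length → d.getD j 0 = 1 →
    ∃ u : Nat, u < adj.length ∧ (u : Int) ∈ chosen ∧ (j : Int) ∈ adj.getD u [])

def pvQ1 (adj : List (List Int)) (dist : List Int) (q : List Nat) : Prop :=
  ∀ x ∈ q, x < adj.length ∧ 0 ≤ dist.getD x 0

-- invariant used when every vertex is one-step covered (queue stays 0s-then-1s)
def pvP2 (adj : List (List Int)) (chosen : List Int) (dist : List Int) (q : List Nat) : Prop :=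
  dist.length = adj.length ∧
  (∀ j : Nat, j < adj.length → (j : Int) ∈ chosen → dist.getD j 0 = 0) ∧
  (∀ j : Nat, j < adj.length →
      dist.getD j 0 = -1 ∨ (0 ≤ dist.getD j 0 ∧ dist.getD j 0 ≤ 1)) ∧
  (∀ x ∈ q, x < adj.length ∧ 0 ≤ dist.getD x 0) ∧
  q.Pairwise (fun a b => dist.getD a 0 ≤ dist.getD b 0) ∧
  (∀ c : Nat, c < adj.length → (c : Int) ∈ chosen →
    (c ∈ q ∨ ∀ w ∈ adj.getD c [], dist.getD w.toNat 0 ≠ -1))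

theorem pv_row_spec (u : Nat) (row : List Int) :
    ∀ (dist : List Int) (q : List Nat), u < dist.length → 0 ≤ dist.getD u 0 →
    ∃ d' ext,
      pvBfsRow u row (dist, q) = (d', q ++ ext) ∧
      d'.length = dist.length ∧
      d'.getD u 0 = dist.getD u 0 ∧
      (∀ j : Nat, d'.getD j 0 = dist.getD j 0 ∨
        (dist.getD j 0 = -1 ∧ d'.getD j 0 = dist.getD u 0 + 1 ∧ (j : Int) ∈ row ∧ j < dist.length)) ∧
      (∀ w ∈ row, 0 ≤ w → w < (dist.length : Int) → d'.getD w.toNat 0 ≠ -1) ∧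
      (∀ x ∈ ext, x < dist.length ∧ d'.getD x 0 = dist.getD u 0 + 1) ∧
      d'.countP (fun d => d = -1) + ext.length = dist.countP (fun d => d = -1) := by
  induction row with
  | nil =>
    intro dist q _ _
    exact ⟨dist, [], by simp [pvBfsRow], rfl, rfl, fun j => Or.inl rfl, by simp, by simp, by simp⟩
  | cons w rest ih =>
    intro dist q hu hdu
    have hstep : pvBfsRow u (w :: rest) (dist, q)
        = pvBfsRow u rest (if 0 ≤ w ∧ w < ((dist.length : Nat) : Int) then
            (if dist.getD w.toNat 0 = -1 then
              (dist.set w.toNat (dist.getD u 0 + 1), q ++ [w.toNat])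
            else (dist, q))
          else (dist, q)) := by
      simp only [pvBfsRow, List.foldl_cons]
    by_cases hwr : 0 ≤ w ∧ w < ((dist.length : Nat) : Int)
    · by_cases hneg : dist.getD w.toNat 0 = -1
      · -- write case
        have hwt : w.toNat < dist.length := by omega
        have hne_u : w.toNat ≠ u := by
          intro h; rw [h] at hneg; omega
        have hget1 : ∀ j : Nat, (dist.set w.toNat (dist.getD u 0 + 1)).getD j 0
            = if j = w.toNat then dist.getD u 0 + 1 else dist.getD j 0 := by
          intro j; exact pv_getD_set _ _ _ _ hwt
        have hlen1 : (dist.set w.toNat (dist.getD u 0 + 1)).length = dist.length := by simp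
        have hu1 : (dist.set w.toNat (dist.getD u 0 + 1)).getD u 0 = dist.getD u 0 := by
          rw [hget1, if_neg (by omega)]
        obtain ⟨d', ext', heq, hlen', hu', hpt, hrow, hext, hcnt⟩ :=
          ih (dist.set w.toNat (dist.getD u 0 + 1)) (q ++ [w.toNat]) (by omega)
            (by rw [hu1]; exact hdu)
        rw [hu1] at hu'
        refine ⟨d', w.toNat :: ext', ?_, hlen'.trans hlen1, hu', ?_, ?_, ?_, ?_⟩
        · rw [hstep, if_pos hwr, if_pos hneg, heq, List.append_assoc]
          rfl
        · intro j
          rcases hpt j with h | ⟨h1, h2, h3, h4⟩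
          · rw [hget1] at h
            by_cases hj : j = w.toNat
            · right
              refine ⟨by rw [hj]; exact hneg, by rw [h, if_pos hj], ?_, by omega⟩
              have hjw : (j : Int) = w := by omega
              rw [hjw]; exact List.mem_cons_self ..
            · left; rw [h, if_neg hj]
          · rw [hget1] at h1
            rw [hu1] at h2
            by_cases hj : j = w.toNat
            · rw [if_pos hj] at h1; omega
            · rw [if_neg hj] at h1
              right
              refine ⟨h1, h2, List.mem_cons_of_mem _ h3, ?_⟩
              rw [hlen1] at h4; exact h4
        · intro w' hw' h0 hlt
          rcases List.mem_cons.mp hw' with rfl | hw''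
          · rcases hpt w'.toNat with h | ⟨_, h2, _, _⟩
            · rw [h, hget1, if_pos rfl]; omega
            · rw [h2, hu1]; omega
          · refine hrow w' hw'' h0 ?_
            rw [hlen1]; exact hlt
        · intro x hx
          rcases List.mem_cons.mp hx with rfl | hx'
          · refine ⟨hwt, ?_⟩
            rcases hpt w.toNat with h | ⟨_, h2, _, _⟩
            · rw [h, hget1, if_pos rfl]
            · rw [h2, hu1]
          · obtain ⟨h1, h2⟩ := hext x hx'
            rw [hlen1] at h1
            rw [hu1] at h2
            exact ⟨h1, h2⟩
        · have hdec : (dist.set w.toNat (dist.getD u 0 + 1)).countP (fun d => d = -1) + 1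
              = dist.countP (fun d => d = -1) :=
            pv_countP_set_dec _ _ _ hwt hneg (by omega)
          simp only [List.length_cons]
          omega
      · -- in range but already set
        obtain ⟨d', ext, heq, hlen', hu', hpt, hrow, hext, hcnt⟩ := ih dist q hu hdu
        refine ⟨d', ext, ?_, hlen', hu', ?_, ?_, hext, hcnt⟩
        · rw [hstep, if_pos hwr, if_neg hneg]; exact heq
        · intro j
          rcases hpt j with h | ⟨h1, h2, h3, h4⟩
          · exact Or.inl h
          · exact Or.inr ⟨h1, h2, List.mem_cons_of_mem _ h3, h4⟩
        · intro w' hw' h0 hlt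
          rcases List.mem_cons.mp hw' with rfl | hw''
          · rcases hpt w'.toNat with h | ⟨_, h2, _, _⟩
            · rw [h]; exact hneg
            · rw [h2]; omega
          · exact hrow w' hw'' h0 hlt
    · -- out of range (Pre_ rules this out; the guard only totalises)
      obtain ⟨d', ext, heq, hlen', hu', hpt, hrow, hext, hcnt⟩ := ih dist q hu hdu
      refine ⟨d', ext, ?_, hlen', hu', ?_, ?_, hext, hcnt⟩
      · rw [hstep, if_neg hwr]; exact heq
      · intro j
        rcases hpt j with h | ⟨h1, h2, h3, h4⟩
        · exact Or.inl h
        · exact Or.inr ⟨h1, h2, List.mem_cons_of_mem _ h3, h4⟩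
      · intro w' hw' h0 hlt
        rcases List.mem_cons.mp hw' with rfl | hw''
        · exact absurd ⟨h0, hlt⟩ hwr
        · exact hrow w' hw'' h0 hlt

theorem pvP1_step (adj : List (List Int)) (chosen : List Int) (dist : List Int) (u : Nat)
    (q : List Nat) (hP : pvP1 adj chosen dist)
    (hQ : pvQ1 adj dist (u :: q)) :
    pvP1 adj chosen (pvBfsRow u (adj.getD u []) (dist, q)).1 ∧
      pvQ1 adj (pvBfsRow u (adj.getD u []) (dist, q)).1
        (pvBfsRow u (adj.getD u []) (dist, q)).2 := by
  obtain ⟨hL, hm1, h0, h1⟩ := hP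
  obtain ⟨hun, hud⟩ := hQ u (List.mem_cons_self ..)
  obtain ⟨d', ext, heq, hlen', hu', hpt, hrow, hext, hcnt⟩ :=
    pv_row_spec u (adj.getD u []) dist q (by omega) hud
  rw [heq]
  dsimp only
  refine ⟨⟨by omega, ?_, ?_, ?_⟩, ?_⟩
  · intro j hj
    rcases hpt j with h | ⟨_, h2, _, _⟩
    · rw [h]; exact hm1 j hj
    · rw [h2]; omega
  · intro j hj hz
    rcases hpt j with h | ⟨_, h2, _, _⟩
    · rw [h] at hz; exact h0 j hj hz
    · rw [h2] at hz; omega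
  · intro j hj ho
    rcases hpt j with h | ⟨_, h2, h3, _⟩
    · rw [h] at ho; exact h1 j hj ho
    · rw [h2] at ho
      have hdu0 : dist.getD u 0 = 0 := by omega
      exact ⟨u, hun, h0 u hun hdu0, h3⟩
  · intro x hx
    rcases List.mem_append.mp hx with hx' | hx'
    · obtain ⟨hxn, hxd⟩ := hQ x (List.mem_cons_of_mem _ hx')
      rcases hpt x with h | ⟨hneg, _, _, _⟩
      · exact ⟨hxn, by rw [h]; exact hxd⟩
      · omega
    · obtain ⟨hxl, hxv⟩ := hext x hx'
      exact ⟨by omega, by rw [hxv]; omega⟩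

theorem pvP1_run (adj : List (List Int)) (chosen : List Int) :
    ∀ (fuel : Nat) (dist : List Int) (q : List Nat), pvP1 adj chosen dist → pvQ1 adj dist q →
      pvP1 adj chosen (pvBfsRun adj fuel (dist, q)) := by
  intro fuel
  induction fuel with
  | zero => intro dist q h _; exact h
  | succ f ih =>
    intro dist q hP hQ
    cases q with
    | nil => exact hP
    | cons u q =>
      obtain ⟨hP', hQ'⟩ := pvP1_step adj chosen dist u q hP hQ
      have hrun : pvBfsRun adj (f + 1) (dist, u :: q)
          = pvBfsRun adj f (pvBfsRow u (adj.getD u []) (dist, q)) := rfl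
      rw [hrun]
      rcases hst : pvBfsRow u (adj.getD u []) (dist, q) with ⟨d2, q2⟩
      rw [hst] at hP' hQ'
      exact ih d2 q2 hP' hQ'

theorem pvP2_step (adj : List (List Int)) (chosen : List Int) (dist : List Int) (u : Nat)
    (q : List Nat)
    (valid : ∀ row ∈ adj, ∀ w ∈ row, 0 ≤ w ∧ w < (adj.length : Int))
    (allcov : ∀ j : Nat, j < adj.length → pvCov adj chosen j)
    (hP : pvP2 adj chosen dist (u :: q)) :
    pvP2 adj chosen (pvBfsRow u (adj.getD u []) (dist, q)).1
        (pvBfsRow u (adj.getD u []) (dist, q)).2 ∧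
      pvMu (pvBfsRow u (adj.getD u []) (dist, q)).1
        (pvBfsRow u (adj.getD u []) (dist, q)).2 < pvMu dist (u :: q) := by
  obtain ⟨hL, hsel0, h01, hq, hpw, hproc⟩ := hP
  obtain ⟨hun, hud⟩ := hq u (List.mem_cons_self ..)
  obtain ⟨d', ext, heq, hlen', hu', hpt, hrow, hext, hcnt⟩ :=
    pv_row_spec u (adj.getD u []) dist q (by omega) hud
  rw [heq]
  dsimp only
  have hrowmem : adj.getD u [] ∈ adj := by
    rw [List.getD_eq_getElem _ _ (by omega : u < adj.length)]
    exact List.getElem_mem _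
  have hmu : pvMu d' (q ++ ext) < pvMu dist (u :: q) := by
    simp only [pvMu, List.length_append, List.length_cons]
    omega
  have hdu01 : dist.getD u 0 = 0 ∨ dist.getD u 0 = 1 := by
    rcases h01 u hun with h | h <;> omega
  refine ⟨?_, hmu⟩
  rcases hdu01 with hdu | hdu
  · -- pop a distance-0 vertex: new cells get distance 1
    refine ⟨by omega, ?_, ?_, ?_, ?_, ?_⟩
    · intro j hj hjc
      rcases hpt j with h | ⟨hneg, _, _, _⟩
      · rw [h]; exact hsel0 j hj hjc
      · rw [hsel0 j hj hjc] at hneg; omega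
    · intro j hj
      rcases hpt j with h | ⟨_, h2, _, _⟩
      · rw [h]; exact h01 j hj
      · rw [h2, hdu]; omega
    · intro x hx
      rcases List.mem_append.mp hx with hx' | hx'
      · obtain ⟨hxn, hxd⟩ := hq x (List.mem_cons_of_mem _ hx')
        rcases hpt x with h | ⟨hneg, _, _, _⟩
        · exact ⟨hxn, by rw [h]; exact hxd⟩
        · omega
      · obtain ⟨hxl, hxv⟩ := hext x hx'
        exact ⟨by omega, by rw [hxv, hdu]; omega⟩
    · -- queue stays sorted: old entries keep their value ≤ 1, new ones get value 1
      rw [List.pairwise_append]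
      have hqval : ∀ x ∈ q, d'.getD x 0 = dist.getD x 0 := by
        intro x hx
        obtain ⟨hxn, hxd⟩ := hq x (List.mem_cons_of_mem _ hx)
        rcases hpt x with h | ⟨hneg, _, _, _⟩
        · exact h
        · omega
      refine ⟨?_, ?_, ?_⟩
      · have htail : q.Pairwise (fun a b => dist.getD a 0 ≤ dist.getD b 0) :=
          (List.pairwise_cons.mp hpw).2
        exact htail.imp_of_mem (fun {a b} ha hb hab => by
          rw [hqval a ha, hqval b hb]; exact hab)
      · refine List.pairwise_of_forall_mem_list ?_
        intro a ha b hb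
        rw [(hext a ha).2, (hext b hb).2]
      · intro a ha b hb
        rw [hqval a ha, (hext b hb).2, hdu]
        obtain ⟨hxn, hxd⟩ := hq a (List.mem_cons_of_mem _ ha)
        rcases h01 a hxn with h | h <;> omega
    · intro c hc hcc
      by_cases hcu : c = u
      · right
        intro w hw
        rw [hcu] at hw
        obtain ⟨hw0, hwl⟩ := valid _ hrowmem w hw
        exact hrow w hw hw0 (by omega)
      · rcases hproc c hc hcc with hcin | hdone
        · rcases List.mem_cons.mp hcin with h | h
          · exact absurd h hcu
          · exact Or.inl (List.mem_append.mpr (Or.inl h))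
        · right
          intro w hw
          rcases hpt w.toNat with h | ⟨_, h2, _, _⟩
          · rw [h]; exact hdone w hw
          · rw [h2, hdu]; omega
  · -- pop a distance-1 vertex: every selected vertex is already processed, nothing changes
    have hnoc : ∀ c : Nat, c < adj.length → (c : Int) ∈ chosen → c ∉ u :: q := by
      intro c hc hcc hin
      rcases List.mem_cons.mp hin with rfl | hin'
      · rw [hsel0 c hc hcc] at hdu; omega
      · have := (List.pairwise_cons.mp hpw).1 c hin'
        rw [hdu, hsel0 c hc hcc] at this
        omega
    have hnom1 : ∀ j : Nat, j < adj.length → dist.getD j 0 ≠ -1 := by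
      intro j hj
      rcases allcov j hj with hjc | ⟨u', hu'n, hsel', hmem⟩
      · rw [hsel0 j hj hjc]; omega
      · rcases hproc u' hu'n hsel' with hcin | hdone
        · exact absurd hcin (hnoc u' hu'n hsel')
        · have := hdone (j : Int) hmem
          simpa using this
    have hd'd : d' = dist := by
      refine pv_eq_of_getD _ _ (by omega) ?_
      intro j hj
      rw [hlen'] at hj
      rcases hpt j with h | ⟨hneg, _, _, _⟩
      · exact h
      · exact absurd hneg (hnom1 j (by omega))
    have hextnil : ext = [] := by
      rcases hee : ext with _ | ⟨x, ext'⟩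
      · rfl
      · exfalso
        obtain ⟨hxl, hxv⟩ := hext x (by rw [hee]; exact List.mem_cons_self ..)
        rw [hd'd] at hxv
        rcases h01 x (by omega) with h | h <;> rw [hdu] at hxv <;> omega
    rw [hd'd, hextnil, List.append_nil]
    refine ⟨hL, hsel0, h01, ?_, (List.pairwise_cons.mp hpw).2, ?_⟩
    · intro x hx; exact hq x (List.mem_cons_of_mem _ hx)
    · intro c hc hcc
      rcases hproc c hc hcc with hcin | hdone
      · exact absurd hcin (hnoc c hc hcc)
      · exact Or.inr hdone

theorem pvP2_run (adj : List (List Int)) (chosen : List Int)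
    (valid : ∀ row ∈ adj, ∀ w ∈ row, 0 ≤ w ∧ w < (adj.length : Int))
    (allcov : ∀ j : Nat, j < adj.length → pvCov adj chosen j) :
    ∀ (fuel : Nat) (dist : List Int) (q : List Nat), pvMu dist q ≤ fuel →
      pvP2 adj chosen dist q →
      pvP2 adj chosen (pvBfsRun adj fuel (dist, q)) [] := by
  intro fuel
  induction fuel with
  | zero =>
    intro dist q hmu hP
    have hq : q = [] := by
      simp only [pvMu] at hmu
      exact List.eq_nil_of_length_eq_zero (by omega)
    subst hq
    exact hP
  | succ f ih =>
    intro dist q hmu hP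
    cases q with
    | nil => exact hP
    | cons u q =>
      obtain ⟨hP', hlt⟩ := pvP2_step adj chosen dist u q valid allcov hP
      have hrun : pvBfsRun adj (f + 1) (dist, u :: q)
          = pvBfsRun adj f (pvBfsRow u (adj.getD u []) (dist, q)) := rfl
      rw [hrun]
      rcases hst : pvBfsRow u (adj.getD u []) (dist, q) with ⟨d2, q2⟩
      rw [hst] at hP' hlt
      exact ih d2 q2 (by dsimp only at hlt; omega) hP'

-- ---------- the initial distance array and queue ----------

theorem pv_init_spec (config : List Int) :
    ∀ (l : List Nat) (st : List Int × List Nat), (∀ v ∈ l, v < st.1.length) →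
    (l.foldl (fun (st : List Int × List Nat) (v : Nat) =>
        if PySem.List.pyGetD config (v : Int) 0 = 1 then (st.1.set v 0, st.2 ++ [v]) else st)
      st).1.length = st.1.length ∧
    (∀ j : Nat,
      (l.foldl (fun (st : List Int × List Nat) (v : Nat) =>
          if PySem.List.pyGetD config (v : Int) 0 = 1 then (st.1.set v 0, st.2 ++ [v]) else st)
        st).1.getD j 0
        = if j ∈ l ∧ config.getD j 0 = 1 then 0 else st.1.getD j 0) ∧
    (l.foldl (fun (st : List Int × List Nat) (v : Nat) =>
        if PySem.List.pyGetD config (v : Int) 0 = 1 then (st.1.set v 0, st.2 ++ [v]) else st)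
      st).2 = st.2 ++ l.filter (fun v => config.getD v 0 = 1) := by
  intro l
  induction l with
  | nil => intro st _; simp
  | cons v l ih =>
    intro st hb
    have hv : v < st.1.length := hb v (List.mem_cons_self ..)
    have hcv : PySem.List.pyGetD config (v : Int) 0 = config.getD v 0 := by
      simp [PySem.List.pyGetD_natCast]
    by_cases h : config.getD v 0 = 1
    · have hstep : (v :: l).foldl (fun (st : List Int × List Nat) (v : Nat) =>
          if PySem.List.pyGetD config (v : Int) 0 = 1 then (st.1.set v 0, st.2 ++ [v]) else st) st
          = l.foldl (fun (st : List Int × List Nat) (v : Nat) =>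
            if PySem.List.pyGetD config (v : Int) 0 = 1 then (st.1.set v 0, st.2 ++ [v]) else st)
            (st.1.set v 0, st.2 ++ [v]) := by
        rw [List.foldl_cons, if_pos (by rw [hcv]; exact h)]
      obtain ⟨ihl, ihg, ihq⟩ := ih (st.1.set v 0, st.2 ++ [v])
        (by intro z hz; simpa using hb z (List.mem_cons_of_mem _ hz))
      rw [hstep]
      refine ⟨by simpa using ihl, ?_, ?_⟩
      · intro j
        rw [ihg j]
        simp only
        rw [pv_getD_set _ _ _ _ hv]
        by_cases h1 : j ∈ l ∧ config.getD j 0 = 1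
        · rw [if_pos h1, if_pos ⟨List.mem_cons_of_mem _ h1.1, h1.2⟩]
        · rw [if_neg h1]
          by_cases h2 : j = v
          · subst h2
            rw [if_pos rfl, if_pos ⟨List.mem_cons_self .., h⟩]
          · rw [if_neg h2, if_neg (by
              intro ⟨hm, hcc⟩
              rcases List.mem_cons.mp hm with h3 | h3
              · exact h2 h3
              · exact h1 ⟨h3, hcc⟩)]
      · rw [ihq]
        rw [List.filter_cons, if_pos (decide_eq_true h)]
        simp
    · have hstep : (v :: l).foldl (fun (st : List Int × List Nat) (v : Nat) =>
          if PySem.List.pyGetD config (v : Int) 0 = 1 then (st.1.set v 0, st.2 ++ [v]) else st) st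
          = l.foldl (fun (st : List Int × List Nat) (v : Nat) =>
            if PySem.List.pyGetD config (v : Int) 0 = 1 then (st.1.set v 0, st.2 ++ [v]) else st)
            st := by
        rw [List.foldl_cons, if_neg (by rw [hcv]; exact h)]
      obtain ⟨ihl, ihg, ihq⟩ := ih st (fun z hz => hb z (List.mem_cons_of_mem _ hz))
      rw [hstep]
      refine ⟨ihl, ?_, ?_⟩
      · intro j
        rw [ihg j]
        by_cases h1 : j ∈ l ∧ config.getD j 0 = 1
        · rw [if_pos h1, if_pos ⟨List.mem_cons_of_mem _ h1.1, h1.2⟩]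
        · rw [if_neg h1, if_neg (by
            intro ⟨hm, hcc⟩
            rcases List.mem_cons.mp hm with h3 | h3
            · subst h3; exact h hcc
            · exact h1 ⟨h3, hcc⟩)]
      · rw [ihq]
        rw [List.filter_cons, if_neg (by simpa using h)]

-- ---------- feasibility = one-step coverage ----------

theorem pv_feas_iff (adj : List (List Int)) (chosen : List Int) (k : Int)
    (hn : 0 < adj.length)
    (valid : ∀ row ∈ adj, ∀ w ∈ row, 0 ≤ w ∧ w < (adj.length : Int))
    (hb : ∀ x ∈ chosen, 0 ≤ x ∧ x < (adj.length : Int))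
    (hnd : chosen.Nodup) (hlen : (chosen.length : Int) = k) :
    (pv_is_feasible_multicenter adj
        (chosen.foldl (fun cfg v => PySem.List.pySetD cfg v 1) (List.replicate adj.length 0)) k 1
      = true)
      ↔ ∀ j : Nat, j < adj.length → pvCov adj chosen j := by
  set n := adj.length with hn'
  set config := chosen.foldl (fun cfg v => PySem.List.pySetD cfg v 1)
    (List.replicate n (0 : Int)) with hconfig
  have hbn : ∀ y ∈ chosen, 0 ≤ y ∧ y < (n : Int) := hb
  have hcfg : ∀ j : Nat, config.getD j 0 = if (j : Int) ∈ chosen then 1 else 0 := by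
    intro j; rw [hconfig]; exact pvConfig_getD chosen n j hbn
  have hsum : config.sum = k := by
    rw [hconfig, pvConfig_sum chosen n hnd hbn, hlen]
  -- the initial state
  obtain ⟨hlen0, hget0, hq0⟩ := pv_init_spec config (List.range n) (List.replicate n (-1), [])
    (by intro v hv; simp only [List.length_replicate]; exact List.mem_range.mp hv)
  set st0 := (List.range n).foldl (fun (st : List Int × List Nat) (v : Nat) =>
      if PySem.List.pyGetD config (v : Int) 0 = 1 then (st.1.set v 0, st.2 ++ [v]) else st)
    (List.replicate n (-1), []) with hst0
  simp only [List.length_replicate] at hlen0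
  have hrep : ∀ j : Nat, (List.replicate n (-1 : Int)).getD j 0 = if j < n then -1 else 0 := by
    intro j
    by_cases h : j < n
    · simp [List.getD_eq_getElem?_getD, List.getElem?_replicate, h]
    · rw [List.getD_eq_default _ _ (by simpa using Nat.le_of_not_lt h), if_neg h]
  have hget0' : ∀ j : Nat, j < n → st0.1.getD j 0 = if (j : Int) ∈ chosen then 0 else -1 := by
    intro j hj
    rw [hget0 j, hrep j, hcfg j]
    by_cases h : (j : Int) ∈ chosen
    · simp [h, List.mem_range.mpr hj]
    · simp [h, hj]
  have hq0' : st0.2 = (List.range n).filter (fun v => config.getD v 0 = 1) := by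
    simpa using hq0
  have hq0mem : ∀ x : Nat, x ∈ st0.2 ↔ (x < n ∧ (x : Int) ∈ chosen) := by
    intro x
    rw [hq0', List.mem_filter, List.mem_range]
    constructor
    · rintro ⟨h1, h2⟩
      refine ⟨h1, ?_⟩
      have := hcfg x
      rw [of_decide_eq_true h2] at this
      by_contra hx
      rw [if_neg hx] at this
      omega
    · rintro ⟨h1, h2⟩
      refine ⟨h1, decide_eq_true ?_⟩
      rw [hcfg x, if_pos h2]
  -- the fuel suffices: |queue| + #missing = n
  have heta : ∀ fuel : Nat, pvBfsRun adj fuel st0 = pvBfsRun adj fuel (st0.1, st0.2) := by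
    intro fuel; rw [Prod.mk.eta]
  have hmu0 : pvMu st0.1 st0.2 = n := by
    have hst1 : st0.1 = (List.range n).map
        (fun j => if config.getD j 0 = 1 then (0 : Int) else -1) := by
      refine pv_eq_of_getD _ _ (by simp [hlen0]) ?_
      intro j hj
      rw [hlen0] at hj
      rw [hget0' j hj]
      rw [List.getD_eq_getElem _ _ (by simpa using hj), List.getElem_map, List.getElem_range]
      rw [hcfg j]
      by_cases h : (j : Int) ∈ chosen <;> simp [h]
    simp only [pvMu, hq0', hst1, List.countP_map]
    rw [← List.countP_eq_length_filter]
    have hcongr : ∀ j ∈ List.range n,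
        (((fun d => decide (d = -1)) ∘ fun j => if config.getD j 0 = 1 then (0 : Int) else -1) j
          = true)
          ↔ ((!(decide (config.getD j 0 = 1))) = true) := by
      intro j _
      by_cases h : config.getD j 0 = 1 <;> simp [h]
    rw [List.countP_congr hcongr]
    have hsp := pv_countP_split (List.range n) (fun v => decide (config.getD v 0 = 1))
    simp only [List.length_range] at hsp
    omega
  -- invariants at the initial state
  have hP1 : pvP1 adj chosen st0.1 := by
    refine ⟨by rw [hlen0], ?_, ?_, ?_⟩
    · intro j hj
      rw [hget0' j hj]
      by_cases h : (j : Int) ∈ chosen <;> simp [h]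
    · intro j hj hz
      rw [hget0' j hj] at hz
      by_cases h : (j : Int) ∈ chosen
      · exact h
      · rw [if_neg h] at hz; omega
    · intro j hj ho
      rw [hget0' j hj] at ho
      by_cases h : (j : Int) ∈ chosen
      · rw [if_pos h] at ho; exact absurd ho (by decide)
      · rw [if_neg h] at ho; exact absurd ho (by decide)
  have hQ1 : pvQ1 adj st0.1 st0.2 := by
    intro x hx
    obtain ⟨h1, h2⟩ := (hq0mem x).mp hx
    exact ⟨h1, by rw [hget0' x h1, if_pos h2]⟩
  -- now unfold A's feasibility test
  rw [pv_is_feasible_multicenter]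
  rw [if_neg (by rw [hsum]; simp)]
  rw [pv_shortest_distances]
  simp only [← hst0, ← hn']
  set d := pvBfsRun adj n st0 with hd
  constructor
  · -- feasible → covered
    intro hfeas
    have hP1d : pvP1 adj chosen d := by
      rw [hd, heta n]
      exact pvP1_run adj chosen n st0.1 st0.2 hP1 hQ1
    obtain ⟨hdl, hdm1, hd0, hd1⟩ := hP1d
    by_cases hany : d.any (fun x => x = -1)
    · rw [if_pos hany] at hfeas; simp at hfeas
    · rw [if_neg hany] at hfeas
      have hnone : ∀ x ∈ d, x ≠ -1 := by
        intro x hx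
        have := List.any_eq_false.mp (Bool.not_eq_true _ ▸ hany) x hx
        simpa using this
      rcases hdd : d with _ | ⟨d0, ds⟩
      · exfalso; rw [hdd] at hdl; simp at hdl; omega
      · rw [hdd] at hfeas
        have hmax : ds.foldl max d0 ≤ 1 := by
          simpa using hfeas
        have hled : ∀ x ∈ d, x ≤ 1 := by
          intro x hx
          rw [hdd] at hx
          rcases List.mem_cons.mp hx with hx0 | hx'
          · rw [hx0]; exact le_trans (PySem.List.le_foldl_max ds d0).1 hmax
          · exact le_trans ((PySem.List.le_foldl_max ds d0).2 x hx') hmax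
        intro j hj
        have hjd : j < d.length := by omega
        have hval : d.getD j 0 = d[j] := List.getD_eq_getElem _ _ hjd
        have hmem : d[j] ∈ d := List.getElem_mem _
        have hne : d[j] ≠ -1 := hnone _ hmem
        have hle : d[j] ≤ 1 := hled _ hmem
        have hge : -1 ≤ d.getD j 0 := hdm1 j hj
        rw [hval] at hge
        have hcase : d[j] = 0 ∨ d[j] = 1 := by omega
        rcases hcase with h | h
        · exact Or.inl (hd0 j hj (by rw [hval]; exact h))
        · exact Or.inr (hd1 j hj (by rw [hval]; exact h))
  · -- covered → feasible
    intro hcov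
    have hP2 : pvP2 adj chosen st0.1 st0.2 := by
      refine ⟨by rw [hlen0], ?_, ?_, hQ1, ?_, ?_⟩
      · intro j hj hjc
        rw [hget0' j hj, if_pos hjc]
      · intro j hj
        rw [hget0' j hj]
        by_cases h : (j : Int) ∈ chosen <;> simp [h]
      · refine List.pairwise_of_forall_mem_list ?_
        intro a ha b hb'
        obtain ⟨ha1, ha2⟩ := (hq0mem a).mp ha
        obtain ⟨hb1, hb2⟩ := (hq0mem b).mp hb'
        rw [hget0' a ha1, if_pos ha2, hget0' b hb1, if_pos hb2]
      · intro c hc hcc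
        exact Or.inl ((hq0mem c).mpr ⟨hc, hcc⟩)
    have hP2d : pvP2 adj chosen d [] := by
      rw [hd, heta n]
      exact pvP2_run adj chosen valid hcov n st0.1 st0.2 (by omega) hP2
    obtain ⟨hdl, hdsel, hd01, _, _, hdproc⟩ := hP2d
    have hall : ∀ j : Nat, j < n → 0 ≤ d.getD j 0 ∧ d.getD j 0 ≤ 1 := by
      intro j hj
      have hne : d.getD j 0 ≠ -1 := by
        rcases hcov j hj with hjc | ⟨u', hu'n, hsel', hmem⟩
        · rw [hdsel j hj hjc]; omega
        · rcases hdproc u' hu'n hsel' with h | h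
          · simp at h
          · have := h (j : Int) hmem
            simpa using this
      rcases hd01 j hj with h | h
      · exact absurd h hne
      · exact h
    have hany : d.any (fun x => x = -1) = false := by
      rw [List.any_eq_false]
      intro x hx
      obtain ⟨j, hjd, hjx⟩ := List.mem_iff_getElem.mp hx
      have := hall j (by omega)
      rw [List.getD_eq_getElem _ _ hjd, hjx] at this
      simp; omega
    rw [if_neg (by rw [hany]; simp)]
    rcases hdd : d with _ | ⟨d0, ds⟩
    · exfalso
      rw [hdd] at hdl
      simp at hdl
      omega
    · have hdl' : d.length = adj.length := hdl
      have hmax : ds.foldl max d0 ≤ 1 := by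
        rcases PySem.List.foldl_max_mem ds d0 with h | h
        · have h00 : d.getD 0 0 = d0 := by rw [hdd]; rfl
          have h0n := hall 0 hn
          rw [h00] at h0n
          rw [h]
          exact h0n.2
        · have hmem : ds.foldl max d0 ∈ d := by rw [hdd]; exact List.mem_cons_of_mem _ h
          obtain ⟨j, hjd, hjx⟩ := List.mem_iff_getElem.mp hmem
          have := hall j (by omega)
          rw [List.getD_eq_getElem _ _ hjd, hjx] at this
          exact this.2
      simpa using hmax

theorem pv_dom_iff (adj : List (List Int)) (chosen : List Int)
    (valid : ∀ row ∈ adj, ∀ w ∈ row, 0 ≤ w ∧ w < (adj.length : Int))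
    (hb : ∀ x ∈ chosen, 0 ≤ x ∧ x < (adj.length : Int)) :
    (pv_is_dominating_set adj
        (chosen.foldl (fun cfg v => PySem.List.pySetD cfg v 1) (List.replicate adj.length 0))
      = true)
      ↔ ∀ j : Nat, j < adj.length → ((j : Int) ∈ chosen ∨ ∃ u ∈ adj.getD j [], u ∈ chosen) := by
  set n := adj.length with hn'
  have hcfg : ∀ j : Nat, (chosen.foldl (fun cfg v => PySem.List.pySetD cfg v 1)
      (List.replicate n (0 : Int))).getD j 0 = if (j : Int) ∈ chosen then 1 else 0 :=
    fun j => pvConfig_getD chosen n j hb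
  rw [pv_is_dominating_set, List.all_eq_true]
  constructor
  · intro h j hj
    have hjm : (j : Int) ∈ PySem.List.pyRange 0 (n : Int) 1 := by
      rw [PySem.List.mem_pyRange_one]; omega
    have := h _ hjm
    by_cases hjc : (j : Int) ∈ chosen
    · exact Or.inl hjc
    · right
      rw [if_neg (by
          rw [PySem.List.pyGetD_of_nonneg _ _ (by omega : (0:Int) ≤ (j:Int))]
          simp only [Int.toNat_natCast]
          rw [hcfg j, if_neg hjc]
          omega)] at this
      rw [List.any_eq_true] at this
      obtain ⟨u, hu, hcu⟩ := this
      rw [PySem.List.pyGetD_of_nonneg _ _ (by omega : (0:Int) ≤ (j:Int))] at hu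
      simp only [Int.toNat_natCast] at hu
      refine ⟨u, hu, ?_⟩
      obtain ⟨hu0, hul⟩ := valid _ (by
        rw [List.getD_eq_getElem _ _ (by omega : j < adj.length)]
        exact List.getElem_mem _) u hu
      have := of_decide_eq_true hcu
      rw [PySem.List.pyGetD_of_nonneg _ _ hu0, hcfg u.toNat] at this
      by_contra hx
      rw [if_neg (by rwa [Int.toNat_of_nonneg hu0])] at this
      omega
  · intro h v hv
    rw [PySem.List.mem_pyRange_one] at hv
    have hvt : v.toNat < n := by omega
    split_ifs with hsel
    · rfl
    · rcases h v.toNat hvt with hjc | ⟨u, hu, hcu⟩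
      · exact absurd (by
          rw [PySem.List.pyGetD_of_nonneg _ _ hv.1, hcfg v.toNat, if_pos hjc]) hsel
      · rw [List.any_eq_true]
        refine ⟨u, ?_, ?_⟩
        · rw [PySem.List.pyGetD_of_nonneg _ _ hv.1]
          exact hu
        · obtain ⟨hu0, hul⟩ := valid _ (by
            rw [List.getD_eq_getElem _ _ hvt]
            exact List.getElem_mem _) u hu
          refine decide_eq_true ?_
          rw [PySem.List.pyGetD_of_nonneg _ _ hu0, hcfg u.toNat,
            if_pos (by rwa [Int.toNat_of_nonneg hu0])]

theorem pv_B_iff (adj : List (List Int)) (chosen : List Int) :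
    (((PySem.List.pyRange 0 (adj.length : Int) 1).all (fun v =>
        PySem.Set.contains (PySem.Set.ofList chosen) v
          || (PySem.List.pyGetD adj v []).any (fun u =>
                PySem.Set.contains (PySem.Set.ofList chosen) u))) = true)
      ↔ ∀ j : Nat, j < adj.length → ((j : Int) ∈ chosen ∨ ∃ u ∈ adj.getD j [], u ∈ chosen) := by
  rw [List.all_eq_true]
  constructor
  · intro h j hj
    have hjm : (j : Int) ∈ PySem.List.pyRange 0 (adj.length : Int) 1 := by
      rw [PySem.List.mem_pyRange_one]; omega
    have := h _ hjm
    rw [Bool.or_eq_true, List.any_eq_true] at this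
    rcases this with h1 | ⟨u, hu, hcu⟩
    · left
      have : (j : Int) ∈ PySem.Set.ofList chosen := by
        simpa [PySem.Set.contains] using h1
      simpa [PySem.Set.mem_ofList] using this
    · right
      rw [PySem.List.pyGetD_of_nonneg _ _ (by omega : (0:Int) ≤ (j:Int))] at hu
      simp only [Int.toNat_natCast] at hu
      refine ⟨u, hu, ?_⟩
      have : u ∈ PySem.Set.ofList chosen := by
        simpa [PySem.Set.contains] using hcu
      simpa [PySem.Set.mem_ofList] using this
  · intro h v hv
    rw [PySem.List.mem_pyRange_one] at hv
    have hvt : v.toNat < adj.length := by omega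
    rw [Bool.or_eq_true, List.any_eq_true]
    rcases h v.toNat hvt with hjc | ⟨u, hu, hcu⟩
    · left
      simp only [PySem.Set.contains]
      rw [Int.toNat_of_nonneg hv.1] at hjc
      simp [PySem.Set.mem_ofList, hjc]
    · right
      refine ⟨u, ?_, ?_⟩
      · rw [PySem.List.pyGetD_of_nonneg _ _ hv.1]
        exact hu
      · simp only [PySem.Set.contains]
        simp [PySem.Set.mem_ofList, hcu]

theorem pv_cov_iff_out (adj : List (List Int)) (chosen : List Int) (j : Nat)
    (hj : j < adj.length)
    (valid : ∀ row ∈ adj, ∀ w ∈ row, 0 ≤ w ∧ w < (adj.length : Int))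
    (sym : ∀ v : Nat, v < adj.length → ∀ w ∈ adj.getD v [], (v : Int) ∈ adj.getD w.toNat []) :
    pvCov adj chosen j ↔ ((j : Int) ∈ chosen ∨ ∃ u ∈ adj.getD j [], u ∈ chosen) := by
  constructor
  · rintro (h | ⟨u, hu, hcu, hmem⟩)
    · exact Or.inl h
    · right
      have := sym u hu (j : Int) hmem
      simp only [Int.toNat_natCast] at this
      exact ⟨(u : Int), this, hcu⟩
  · rintro (h | ⟨u, humem, hcu⟩)
    · exact Or.inl h
    · obtain ⟨hu0, hul⟩ := valid _ (by
        rw [List.getD_eq_getElem _ _ hj]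
        exact List.getElem_mem _) u humem
      have := sym j hj u humem
      right
      exact ⟨u.toNat, by omega, by rwa [Int.toNat_of_nonneg hu0], this⟩

-- ===== VERDICT (by name: the statement is the Claim_ definition above) =====
theorem check_extraction_spec : Claim_equal_check_extraction := by
  intro adj edges k _hDom hPre
  unfold Spec_check_extraction check_extraction check_extraction_alt
  dsimp only
  obtain ⟨hk, hne, hval⟩ := hPre
  by_cases hkn : k ≤ (adj.length : Int)
  · obtain ⟨valid, sym⟩ := hval hkn
    have hn : 0 < adj.length := by
      rcases Nat.eq_zero_or_pos adj.length with h0 | h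
      · exact absurd ⟨List.eq_nil_of_length_eq_zero h0, by omega⟩ hne
      · exact h
    refine PySem.List.foldl_congr_mem _ _ _ _ ?_
    intro acc c hc
    obtain ⟨hsub, hlen⟩ := pvComb_mem _ _ _ hc
    have hb : ∀ x ∈ c, 0 ≤ x ∧ x < (adj.length : Int) := by
      intro x hx
      have := hsub.subset hx
      rw [PySem.List.mem_pyRange_one] at this
      omega
    have hnd : c.Nodup := (PySem.List.nodup_pyRange_one 0 (adj.length : Int)).sublist hsub
    have hlen' : (c.length : Int) = k := by
      rw [hlen]; exact_mod_cast Int.toNat_of_nonneg hk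
    by_cases hcov : ∀ j : Nat, j < adj.length → pvCov adj c j
    · have hout : ∀ j : Nat, j < adj.length →
          ((j : Int) ∈ c ∨ ∃ u ∈ adj.getD j [], u ∈ c) :=
        fun j hj => (pv_cov_iff_out adj c j hj valid sym).mp (hcov j hj)
      rw [(pv_feas_iff adj c k hn valid hb hnd hlen').mpr hcov,
        (pv_dom_iff adj c valid hb).mpr hout, (pv_B_iff adj c).mpr hout]
      simp
    · have hout : ¬ ∀ j : Nat, j < adj.length →
          ((j : Int) ∈ c ∨ ∃ u ∈ adj.getD j [], u ∈ c) := by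
        intro h
        exact hcov (fun j hj => (pv_cov_iff_out adj c j hj valid sym).mpr (h j hj))
      have hF : pv_is_feasible_multicenter adj
          (c.foldl (fun cfg v => PySem.List.pySetD cfg v 1)
            (List.replicate adj.length 0)) k 1 = false := by
        rw [← Bool.not_eq_true, pv_feas_iff adj c k hn valid hb hnd hlen']
        exact hcov
      have hB : ((PySem.List.pyRange 0 (adj.length : Int) 1).all (fun v =>
          PySem.Set.contains (PySem.Set.ofList c) v
            || (PySem.List.pyGetD adj v []).any (fun u =>
                  PySem.Set.contains (PySem.Set.ofList c) u))) = false := by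
        rw [← Bool.not_eq_true, pv_B_iff adj c]
        exact hout
      rw [hF, hB]
      simp
  · rw [pvComb_nil _ _ (by rw [PySem.List.length_pyRange_one]; omega)]
    rfl
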